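-- pv_equiv track=rewrite | github.com/Divyajyoti1801/Interview_Prepration | Data Structure and Algorithm/Trie_Data_Structure.py | unique_rows
-- ===== SOURCE A (Python) =====
-- from collections import defaultdict
--
-- def unique_rows(arr):
--     mp = defaultdict(int)
--     t = ""
--
--     for x in arr:
--         t = ""
--         for y in x:
--             t+=y
--         mp[t] += 1
--
--     cnt = 0
--     for x in mp:
--         if(mp[x] == 1):
--             cnt+=1
--     return cnt
-- ===== SOURCE B (Python) =====
-- def unique_rows(arr):
--     # Sort the joined row-keys, then count length-1 runs in one linear scan.
--     keys = sorted("".join(row) for row in arr)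
--     n = len(keys)
--     cnt = 0
--     i = 0
--     while i < n:
--         j = i + 1
--         while j < n and keys[j] == keys[i]:
--             j += 1
--         if j - i == 1:
--             cnt += 1
--         i = j
--     return cnt
-- ===== Notes on version B (the rewrite author's own statement) =====
-- stated objective: alternative
-- what changed: Replaces the defaultdict frequency map plus a second pass over its keys by sorting the joined row-keys once and counting length-1 runs in a single linear scan of the sorted list.
import Mathlib
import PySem

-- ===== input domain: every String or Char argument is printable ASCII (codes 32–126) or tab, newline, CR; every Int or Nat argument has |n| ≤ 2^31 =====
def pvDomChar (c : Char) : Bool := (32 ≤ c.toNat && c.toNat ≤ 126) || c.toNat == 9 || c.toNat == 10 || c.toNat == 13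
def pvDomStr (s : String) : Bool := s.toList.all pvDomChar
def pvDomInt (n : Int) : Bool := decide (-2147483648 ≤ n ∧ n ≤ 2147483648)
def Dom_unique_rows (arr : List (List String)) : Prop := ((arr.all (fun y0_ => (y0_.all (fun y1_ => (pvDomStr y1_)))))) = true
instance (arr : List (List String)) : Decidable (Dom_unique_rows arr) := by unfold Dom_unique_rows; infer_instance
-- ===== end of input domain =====

-- B replaces A's defaultdict frequency map + key pass by sort-then-run-length scan (alternative algorithm, same results).


-- ===== PORT A =====
-- for x in arr: t = ""; for y in x: t += y; mp[t] += 1   (defaultdict(int))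
-- then: for x in mp: if mp[x] == 1: cnt += 1
def unique_rows (arr : List (List String)) : Int :=
  let mp : PySem.Dict String Int :=
    arr.foldl (fun d x =>
      let t := x.foldl (fun t y => t ++ y) ""
      d.modify t 0 (· + 1)) PySem.Dict.empty
  mp.keys.foldl (fun cnt x => if mp.getD x 0 = 1 then cnt + 1 else cnt) 0

-- ===== PORT B =====
-- the inner while loop advancing j over the run of keys equal to keys[i]
def pvRunScan : List String → Int
  | [] => 0
  | x :: rest =>
      let run := rest.takeWhile (fun y => y == x)
      (if run.length = 0 then (1 : Int) else 0) + pvRunScan (rest.dropWhile (fun y => y == x))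
termination_by l => l.length
decreasing_by
  simpa using Nat.lt_succ_of_le (List.dropWhile_sublist _).length_le

def unique_rows_alt (arr : List (List String)) : Int :=
  pvRunScan (PySem.List.sorted (arr.map (fun row => PySem.Str.join "" row)) (fun k => k) false)

-- ===== PRECONDITION & SPEC =====
def Spec_unique_rows (arr : List (List String)) (out : Int) : Prop := out = unique_rows_alt arr
instance (arr : List (List String)) (out : Int) : Decidable (Spec_unique_rows arr out) := by unfold Spec_unique_rows; infer_instance

-- ===== CLAIM (what is proved, stated in full; the proofs are below) =====
def Claim_equal_unique_rows : Prop := ∀ (arr : List (List String)), Dom_unique_rows arr → Spec_unique_rows arr (unique_rows arr)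

-- ===== LEMMAS AND PROOFS =====

-- A's inner `t += y` loop equals `"".join(x)`
theorem pv_foldl_append_toList (x : List String) (t : String) :
    (x.foldl (fun t y => t ++ y) t).toList = t.toList ++ (x.map String.toList).flatten := by
  induction x generalizing t with
  | nil => simp
  | cons a l ih => simp [List.foldl_cons, ih, String.toList_append]

theorem pv_join_eq_foldl (x : List String) :
    x.foldl (fun t y => t ++ y) "" = PySem.Str.join "" x := by
  apply String.toList_inj.mp
  rw [pv_foldl_append_toList, PySem.Str.toList_join]
  simp [PySem.Chars.join, List.intercalate]
  induction x with
  | nil => simp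
  | cons a l ih => cases l <;> simp_all

-- counting distinct elements with a property = counting positions whose element has count 1
theorem pv_countP_nodup_eq (l d : List String)
    (hn : d.Nodup) (hm : ∀ a, a ∈ d ↔ a ∈ l) :
    d.countP (fun k => decide (l.count k = 1)) = l.countP (fun k => decide (l.count k = 1)) := by
  have hfilter_nodup : (l.filter (fun k => decide (l.count k = 1))).Nodup := by
    rw [List.nodup_iff_count_le_one]
    intro a
    rcases Decidable.em (a ∈ l.filter (fun k => decide (l.count k = 1))) with h | h
    · have h1 := (List.mem_filter.mp h).2
      simp only [decide_eq_true_eq] at h1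
      calc List.count a (l.filter (fun k => decide (l.count k = 1))) ≤ l.count a :=
            List.filter_sublist.count_le a
        _ ≤ 1 := by omega
    · simp [List.count_eq_zero_of_not_mem h]
  have hd_nodup : (d.filter (fun k => decide (l.count k = 1))).Nodup := hn.filter _
  have hperm : (d.filter (fun k => decide (l.count k = 1))).Perm
      (l.filter (fun k => decide (l.count k = 1))) := by
    rw [List.perm_ext_iff_of_nodup hd_nodup hfilter_nodup]
    intro a
    simp only [List.mem_filter, hm]
  simpa only [List.countP_eq_length_filter] using hperm.length_eq

-- countP of a (x :: run ++ tail) split where run is all-x and x is not in tail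
theorem pv_countP_split (x : String) (run tail rest : List String)
    (hsplit : run ++ tail = rest) (hrunx : ∀ y ∈ run, y = x) (hxnot : x ∉ tail) :
    List.countP (fun k => decide (List.count k (x :: rest) = 1)) (x :: rest)
      = (if run.length = 0 then 1 else 0)
        + List.countP (fun k => decide (List.count k tail = 1)) tail := by
  have hcount_run : List.count x run = run.length :=
    List.count_eq_length.mpr (fun b hb => (hrunx b hb).symm)
  have hcount_x : List.count x (x :: rest) = run.length + 1 := by
    rw [← hsplit]
    simp [List.count_append, List.count_cons_self, hcount_run,
      List.count_eq_zero_of_not_mem hxnot]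
  have hcount_tail : ∀ y ∈ tail, List.count y (x :: rest) = List.count y tail := by
    intro y hy
    have hyx : y ≠ x := fun h => hxnot (h ▸ hy)
    have hynr : y ∉ run := fun h => hyx (hrunx y h)
    rw [← hsplit]
    simp [List.count_cons, List.count_append, List.count_eq_zero_of_not_mem hynr]
    exact fun h => hyx h.symm
  have hpx : (decide (List.count x (x :: rest) = 1) = true) ↔ run.length = 0 := by
    simp only [hcount_x, decide_eq_true_eq]
    omega
  have hrun0 : List.countP (fun k => decide (List.count k (x :: rest) = 1)) run = 0 := by
    rw [List.countP_eq_zero]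
    intro y hy
    have hyx := hrunx y hy
    subst hyx
    have : 0 < run.length := List.length_pos_of_ne_nil (List.ne_nil_of_mem hy)
    simp only [hcount_x, decide_eq_true_eq]
    omega
  have htailP : List.countP (fun k => decide (List.count k (x :: rest) = 1)) tail
      = List.countP (fun k => decide (List.count k tail = 1)) tail := by
    apply List.countP_congr
    intro y hy
    simp only [decide_eq_true_eq]
    rw [hcount_tail y hy]
  rw [List.countP_cons, ← hsplit, List.countP_append]
  rw [← hsplit] at hrun0 htailP hpx
  rw [hrun0, htailP]
  by_cases hr : run.length = 0
  · rw [if_pos (hpx.mpr hr), if_pos hr]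
    omega
  · rw [if_neg (fun h => hr (hpx.mp h)), if_neg hr]
    omega

-- run-length scan of a sorted list counts the elements with multiplicity 1
theorem pv_runScan_sorted_aux (n : Nat) : ∀ l : List String, l.length ≤ n → l.Pairwise (· ≤ ·) →
    pvRunScan l = (l.countP (fun k => decide (List.count k l = 1)) : Int) := by
  induction n with
  | zero =>
    intro l hl _
    have : l = [] := List.eq_nil_of_length_eq_zero (Nat.le_zero.mp hl)
    simp [this, pvRunScan]
  | succ n ih =>
    intro l hl hs
    match l with
    | [] => simp [pvRunScan]
    | x :: rest =>
      have hsplit : rest.takeWhile (fun y => y == x) ++ rest.dropWhile (fun y => y == x) = rest :=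
        List.takeWhile_append_dropWhile
      have hrunx : ∀ y ∈ rest.takeWhile (fun y => y == x), y = x := by
        intro y hy
        exact eq_of_beq (List.mem_takeWhile_imp (p := fun y => y == x) hy)
      have hrest_pw : rest.Pairwise (· ≤ ·) := (List.pairwise_cons.mp hs).2
      have hxle : ∀ y ∈ rest, x ≤ y := (List.pairwise_cons.mp hs).1
      have htail_pw : (rest.dropWhile (fun y => y == x)).Pairwise (· ≤ ·) :=
        List.Pairwise.sublist (List.dropWhile_sublist _) hrest_pw
      have htail_sub : (rest.dropWhile (fun y => y == x)) ⊆ rest :=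
        (List.dropWhile_sublist _).subset
      have hxnot : x ∉ rest.dropWhile (fun y => y == x) := by
        intro hx
        match hd : rest.dropWhile (fun y => y == x) with
        | [] => rw [hd] at hx; simp at hx
        | d :: ds =>
          rw [hd] at hx htail_pw
          have hpd : ¬ ((d == x) = true) := by
            have := List.head_dropWhile_not (fun y => y == x) (l := rest) (by simp [hd])
            simpa [hd] using this
          have hdx : d ≠ x := fun h => hpd (by simp [h])
          have hxd : x ≤ d := hxle d (htail_sub (hd ▸ List.mem_cons_self))
          rcases List.mem_cons.mp hx with h | h
          · exact hdx h.symm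
          · exact hdx (le_antisymm ((List.pairwise_cons.mp htail_pw).1 x h) hxd)
      have hlen : (rest.dropWhile (fun y => y == x)).length ≤ n := by
        have h1 : (rest.dropWhile (fun y => y == x)).length ≤ rest.length :=
          (List.dropWhile_sublist _).length_le
        simp only [List.length_cons] at hl
        omega
      have hih := ih _ hlen htail_pw
      rw [pvRunScan]
      rw [hih, pv_countP_split x _ _ rest hsplit hrunx hxnot]
      push_cast
      ring

theorem pv_runScan_sorted (l : List String) (hs : l.Pairwise (· ≤ ·)) :
    pvRunScan l = (l.countP (fun k => decide (List.count k l = 1)) : Int) :=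
  pv_runScan_sorted_aux l.length l (le_refl _) hs

theorem unique_rows_spec : Claim_equal_unique_rows := by
  unfold Claim_equal_unique_rows Spec_unique_rows
  intro arr _
  -- the list of joined row-keys
  have hA : unique_rows arr
      = ((PySem.Set.ofList (arr.map (fun row => PySem.Str.join "" row))).countP
          (fun k => decide (List.count k (arr.map (fun row => PySem.Str.join "" row)) = 1)) : Int) := by
    unfold unique_rows
    have hf : (fun (d : PySem.Dict String Int) (x : List String) =>
          d.modify (x.foldl (fun t y => t ++ y) "") 0 (· + 1))
        = (fun (d : PySem.Dict String Int) (x : List String) =>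
          d.modify (PySem.Str.join "" x) 0 (· + 1)) := by
      funext d x
      rw [pv_join_eq_foldl]
    have hmp : arr.foldl (fun (d : PySem.Dict String Int) x =>
          d.modify (x.foldl (fun t y => t ++ y) "") 0 (· + 1)) PySem.Dict.empty
        = PySem.Dict.counter (arr.map (fun row => PySem.Str.join "" row)) := by
      rw [hf, PySem.Dict.counter_eq_foldl, List.foldl_map]
    simp only [hmp, PySem.List.foldl_ite_add_one, PySem.Dict.keys_counter, Int.zero_add]
    congr 1
    apply List.countP_congr
    intro y _
    simp only [PySem.Dict.getD_counter, decide_eq_true_eq]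
    omega
  have hperm : (PySem.List.sorted (arr.map (fun row => PySem.Str.join "" row)) (fun k => k) false).Perm
      (arr.map (fun row => PySem.Str.join "" row)) := PySem.List.sorted_perm _ _ _
  have hpw : (PySem.List.sorted (arr.map (fun row => PySem.Str.join "" row)) (fun k => k) false).Pairwise (· ≤ ·) := by
    simpa using PySem.List.sorted_pairwise (arr.map (fun row => PySem.Str.join "" row)) (fun k => k)
  have hB : unique_rows_alt arr
      = ((arr.map (fun row => PySem.Str.join "" row)).countP
          (fun k => decide (List.count k (arr.map (fun row => PySem.Str.join "" row)) = 1)) : Int) := by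
    unfold unique_rows_alt
    rw [pv_runScan_sorted _ hpw]
    have h1 : List.countP
          (fun k => decide (List.count k (PySem.List.sorted (arr.map (fun row => PySem.Str.join "" row)) (fun k => k) false) = 1))
          (PySem.List.sorted (arr.map (fun row => PySem.Str.join "" row)) (fun k => k) false)
        = List.countP (fun k => decide (List.count k (arr.map (fun row => PySem.Str.join "" row)) = 1))
          (PySem.List.sorted (arr.map (fun row => PySem.Str.join "" row)) (fun k => k) false) := by
      apply List.countP_congr
      intro y _
      simp only [decide_eq_true_eq, hperm.count_eq]
    rw [h1, hperm.countP_eq]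
  rw [hA, hB]
  norm_cast
  exact pv_countP_nodup_eq _ _ (PySem.Set.nodup_ofList _) (fun a => PySem.Set.mem_ofList _ a)
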